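-- pv_equiv track=rewrite | github.com/dasollee2525/Programmers-Algorithm | Lv2/[Stack]Function.py | solution
-- ===== SOURCE A (Python) =====
-- def solution(progresses, speeds):
--     tasks = [(100-p)//s+1 if (100-p)%s > 0 else (100-p)//s for p, s in zip(progresses, speeds)]
--     answer = []
--     while tasks:
--         count = 0
--         tasks = [i-tasks[0] for i in tasks]
--         tasks.pop(0)
--         count = count + 1
--         if len(tasks) == 0:
--             answer.append(count)
--             break
--         while tasks[0] <= 0:
--             tasks.pop(0)
--             count = count + 1
--             if len(tasks) == 0:
--                 break
--         answer.append(count)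
--     return answer
-- ===== SOURCE B (Python) =====
-- def solution(progresses, speeds):
--     answer = []
--     cur = None
--     cnt = 0
--     for p, s in zip(progresses, speeds):
--         q, r = divmod(100 - p, s)
--         d = q + 1 if r > 0 else q
--         if cur is None or d > cur:
--             if cnt:
--                 answer.append(cnt)
--             cur = d
--             cnt = 1
--         else:
--             cnt += 1
--     if cnt:
--         answer.append(cnt)
--     return answer
-- ===== Notes on version B (the rewrite author's own statement) =====
-- stated objective: faster
-- what changed: Replaces A's repeated whole-list rebuilding (each batch re-maps the remaining task list and pops from the front) with a single left-to-right sweep that computes each task's completion day once and groups consecutive tasks whose day does not exceed the current batch leader's day.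
import Mathlib
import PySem

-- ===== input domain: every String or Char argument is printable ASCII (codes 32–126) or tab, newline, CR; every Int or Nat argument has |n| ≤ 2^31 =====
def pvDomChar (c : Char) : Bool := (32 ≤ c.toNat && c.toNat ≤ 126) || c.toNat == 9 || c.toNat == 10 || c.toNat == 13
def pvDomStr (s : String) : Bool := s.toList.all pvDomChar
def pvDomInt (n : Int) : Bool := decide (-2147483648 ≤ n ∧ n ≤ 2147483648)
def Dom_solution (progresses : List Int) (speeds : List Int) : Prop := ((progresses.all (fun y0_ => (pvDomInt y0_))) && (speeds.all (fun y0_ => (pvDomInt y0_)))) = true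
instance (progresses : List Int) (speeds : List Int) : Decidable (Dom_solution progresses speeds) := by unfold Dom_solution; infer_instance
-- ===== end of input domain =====

-- B replaces A's quadratic batch-by-batch list rebuilding with one linear sweep grouping
-- tasks by the current batch leader's completion day (objective: faster; return value only).

-- ===== PORT A =====

-- ceil-style day count exactly as A's comprehension writes it (Python // and %)
def pvDayA (p : Int) (s : Int) : Int :=
  if PySem.Int.mod (100 - p) s > 0 then PySem.Int.floordiv (100 - p) s + 1
  else PySem.Int.floordiv (100 - p) s

-- inner `while tasks[0] <= 0: tasks.pop(0); count += 1; if empty: break`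
def pvInnerA : List Int → Int → List Int × Int
  | [], count => ([], count)
  | t :: rest, count => if t ≤ 0 then pvInnerA rest (count + 1) else (t :: rest, count)

theorem pvInnerA_fst_length_le : ∀ (xs : List Int) (c : Int), (pvInnerA xs c).1.length ≤ xs.length := by
  intro xs
  induction xs with
  | nil => intro c; simp [pvInnerA]
  | cons t rest ih =>
    intro c
    by_cases h : t ≤ 0
    · simpa [pvInnerA, h] using Nat.le_succ_of_le (ih (c + 1))
    · simp [pvInnerA, h]

-- outer `while tasks:` loop: subtract tasks[0] from all, pop it (count = 1), run the inner loop
def pvOuterA : List Int → List Int → List Int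
  | [], answer => answer
  | t0 :: ts, answer =>
    let rest := ts.map (fun i => i - t0)
    if rest.isEmpty then answer ++ [1]
    else
      let r := pvInnerA rest 1
      pvOuterA r.1 (answer ++ [r.2])
termination_by tasks _ => tasks.length
decreasing_by
  have h := pvInnerA_fst_length_le (ts.map (fun i => i - t0)) 1
  simp at h ⊢; omega

def solution (progresses : List Int) (speeds : List Int) : List Int :=
  pvOuterA ((progresses.zip speeds).map (fun pr => pvDayA pr.1 pr.2)) []

-- ===== PORT B =====

-- one step of B's for-loop: state = (answer, cur, cnt)
def pvStepB (st : List Int × Option Int × Int) (pr : Int × Int) : List Int × Option Int × Int :=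
  let q := PySem.Int.floordiv (100 - pr.1) pr.2
  let r := PySem.Int.mod (100 - pr.1) pr.2
  let d := if r > 0 then q + 1 else q
  match st with
  | (answer, none, cnt) => ((if cnt ≠ 0 then answer ++ [cnt] else answer), some d, 1)
  | (answer, some c, cnt) =>
      if d > c then ((if cnt ≠ 0 then answer ++ [cnt] else answer), some d, 1)
      else (answer, some c, cnt + 1)

-- trailing `if cnt: answer.append(cnt)`
def pvFinishB (st : List Int × Option Int × Int) : List Int :=
  match st with
  | (answer, _, cnt) => if cnt ≠ 0 then answer ++ [cnt] else answer

def solution_alt (progresses : List Int) (speeds : List Int) : List Int :=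
  pvFinishB ((progresses.zip speeds).foldl pvStepB ([], none, 0))

-- ===== PRECONDITION & SPEC =====
-- Pre_ excludes exactly the inputs where some zipped speed is 0: there A's day comprehension
-- raises ZeroDivisionError (B's divmod raises there too).
def Pre_solution (progresses : List Int) (speeds : List Int) : Prop :=
  ∀ pr ∈ progresses.zip speeds, pr.2 ≠ 0
instance (progresses : List Int) (speeds : List Int) : Decidable (Pre_solution progresses speeds) := by unfold Pre_solution; infer_instance

def pvWitness_solution : List Int × List Int := ([93, 30, 55], [1, 30, 5])

def Spec_solution (progresses : List Int) (speeds : List Int) (out : List Int) : Prop := out = solution_alt progresses speeds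
instance (progresses : List Int) (speeds : List Int) (out : List Int) : Decidable (Spec_solution progresses speeds out) := by unfold Spec_solution; infer_instance

-- ===== CLAIM (what is proved, stated in full; the proofs are below) =====
def Claim_equal_solution : Prop := ∀ (progresses : List Int) (speeds : List Int), Dom_solution progresses speeds → Pre_solution progresses speeds → Spec_solution progresses speeds (solution progresses speeds)

-- ===== LEMMAS AND PROOFS =====

-- canonical grouping both programs compute: batch = leader + following tasks with day ≤ leader's
def pvGroups : List Int → List Int
  | [] => []
  | h :: t =>
      (1 + ((t.takeWhile (fun x => x ≤ h)).length : Int)) :: pvGroups (t.dropWhile (fun x => x ≤ h))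
termination_by xs => xs.length
decreasing_by
  have h' := List.length_dropWhile_le (fun x => decide (x ≤ h)) t
  simp at h' ⊢; omega

theorem pvInnerA_eq (xs : List Int) : ∀ c : Int,
    pvInnerA xs c = (xs.dropWhile (fun x => x ≤ 0), c + ((xs.takeWhile (fun x => x ≤ 0)).length : Int)) := by
  induction xs with
  | nil => intro c; simp [pvInnerA]
  | cons t rest ih =>
    intro c
    by_cases h : t ≤ 0
    · simp [pvInnerA, h, ih (c + 1)]; ring
    · simp [pvInnerA, h]

theorem pvGroups_shift (c : Int) : ∀ (n : Nat) (xs : List Int), xs.length ≤ n →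
    pvGroups (xs.map (fun i => i - c)) = pvGroups xs := by
  intro n
  induction n with
  | zero => intro xs h; simp at h; simp [h]
  | succ n ih =>
    intro xs hlen
    cases xs with
    | nil => rfl
    | cons h t =>
      have hp : ((fun x => decide (x ≤ h - c)) ∘ fun i => i - c) = (fun x => decide (x ≤ h)) := by
        funext x
        show decide (x - c ≤ h - c) = decide (x ≤ h)
        exact decide_eq_decide.mpr (by omega)
      rw [List.map_cons, pvGroups, pvGroups, List.takeWhile_map, List.dropWhile_map, hp,
        List.length_map]
      have hd : (t.dropWhile (fun x => x ≤ h)).length ≤ n := by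
        refine le_trans (List.length_dropWhile_le _ _) ?_
        simp at hlen; omega
      rw [ih _ hd]

theorem pvOuterA_eq : ∀ (n : Nat) (xs : List Int) (ans : List Int), xs.length ≤ n →
    pvOuterA xs ans = ans ++ pvGroups xs := by
  intro n
  induction n with
  | zero => intro xs ans h; simp at h; simp [h, pvOuterA, pvGroups]
  | succ n ih =>
    intro xs ans hlen
    cases xs with
    | nil => simp [pvOuterA, pvGroups]
    | cons t0 ts =>
      rw [pvOuterA]
      have hp0 : ((fun x => decide (x ≤ (0:Int))) ∘ fun i => i - t0) = (fun x => decide (x ≤ t0)) := by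
        funext x
        show decide (x - t0 ≤ 0) = decide (x ≤ t0)
        exact decide_eq_decide.mpr (by omega)
      have hmapT : (ts.map (fun i => i - t0)).takeWhile (fun x => x ≤ (0:Int))
          = (ts.takeWhile (fun x => x ≤ t0)).map (fun i => i - t0) := by
        rw [List.takeWhile_map, hp0]
      have hmapD : (ts.map (fun i => i - t0)).dropWhile (fun x => x ≤ (0:Int))
          = (ts.dropWhile (fun x => x ≤ t0)).map (fun i => i - t0) := by
        rw [List.dropWhile_map, hp0]
      by_cases hts : ts = []
      · subst hts
        simp [pvGroups, pvGroups]
      · have hne : ((ts.map (fun i => i - t0)).isEmpty) = false := by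
          simp [hts]
        simp only [hne, Bool.false_eq_true, if_false, pvInnerA_eq, hmapT, hmapD, List.length_map]
        have hdlen : ((ts.dropWhile (fun x => x ≤ t0)).map (fun i => i - t0)).length ≤ n := by
          rw [List.length_map]
          refine le_trans (List.length_dropWhile_le _ _) ?_
          simp at hlen; omega
        rw [ih _ _ hdlen, pvGroups_shift t0 n _ (by rw [List.length_map] at hdlen; exact hdlen)]
        conv_rhs => rw [pvGroups]
        simp [List.append_assoc]

-- B's step seen on the precomputed day value
def pvStepD (st : List Int × Option Int × Int) (d : Int) : List Int × Option Int × Int :=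
  match st with
  | (answer, none, cnt) => ((if cnt ≠ 0 then answer ++ [cnt] else answer), some d, 1)
  | (answer, some c, cnt) =>
      if d > c then ((if cnt ≠ 0 then answer ++ [cnt] else answer), some d, 1)
      else (answer, some c, cnt + 1)

theorem pvStepB_eq (st : List Int × Option Int × Int) (pr : Int × Int) :
    pvStepB st pr = pvStepD st (pvDayA pr.1 pr.2) := by
  rcases st with ⟨a, cur, cnt⟩
  cases cur <;> rfl

theorem pvFoldD_eq (xs : List Int) : ∀ (ans : List Int) (c cnt : Int), 1 ≤ cnt →
    pvFinishB (xs.foldl pvStepD (ans, some c, cnt))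
      = ans ++ (cnt + ((xs.takeWhile (fun x => x ≤ c)).length : Int)) :: pvGroups (xs.dropWhile (fun x => x ≤ c)) := by
  induction xs with
  | nil =>
    intro ans c cnt hc
    have : cnt ≠ 0 := by omega
    simp [pvFinishB, pvGroups, this]
  | cons x t ih =>
    intro ans c cnt hc
    by_cases h : x > c
    · have hx : ¬ x ≤ c := by omega
      simp only [List.foldl_cons, pvStepD, if_pos h, if_pos (show cnt ≠ 0 by omega)]
      rw [ih (ans ++ [cnt]) x 1 (by omega)]
      rw [List.takeWhile_cons_of_neg (by simpa using hx), List.dropWhile_cons_of_neg (by simpa using hx)]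
      rw [pvGroups]
      simp [List.append_assoc]
    · have hx : x ≤ c := by omega
      simp only [List.foldl_cons, pvStepD, if_neg h]
      rw [ih ans c (cnt + 1) (by omega)]
      rw [List.takeWhile_cons_of_pos (by simpa using hx), List.dropWhile_cons_of_pos (by simpa using hx)]
      simp; ring_nf

theorem pvAlt_eq_groups (progresses speeds : List Int) :
    solution_alt progresses speeds = pvGroups ((progresses.zip speeds).map (fun pr => pvDayA pr.1 pr.2)) := by
  unfold solution_alt
  have hfold : ∀ (l : List (Int × Int)) (st : List Int × Option Int × Int),
      l.foldl pvStepB st = (l.map (fun pr => pvDayA pr.1 pr.2)).foldl pvStepD st := by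
    intro l
    induction l with
    | nil => intro st; rfl
    | cons p t ih => intro st; simp [List.foldl_cons, pvStepB_eq, ih]
  rw [hfold]
  cases hd : (progresses.zip speeds).map (fun pr => pvDayA pr.1 pr.2) with
  | nil => simp [pvFinishB, pvGroups]
  | cons d ds =>
    simp only [List.foldl_cons, pvStepD, ne_eq, not_true_eq_false, if_false]
    rw [pvFoldD_eq ds [] d 1 (by omega)]
    rw [pvGroups]
    simp

-- ===== VERDICT (by name: the statement is the Claim_ definition above) =====
theorem solution_spec : Claim_equal_solution := by
  intro progresses speeds _ _
  unfold Spec_solution solution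
  rw [pvAlt_eq_groups, pvOuterA_eq ((progresses.zip speeds).map (fun pr => pvDayA pr.1 pr.2)).length _ _ le_rfl]
  simp
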